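-- pv_equiv track=rewrite | github.com/Kimduckba/eyedetector | Definition_of_Blindness.py | count_transition
-- ===== SOURCE A (Python) =====
-- def count_transition(arr):
--     count = 0
--     transition = False
--
--     for i in range(len(arr)-1):
--         if arr[i] == 1 and arr[i+1] == 0:
--             transition = True
--         elif arr[i] == 0 and arr[i+1] == 1 and transition:
--             count += 1
--             transition = False
--
--     return count
-- ===== SOURCE B (Python) =====
-- def count_transition(arr):
--     # Tokenize adjacent edges: 'D' for a 1->0 drop, 'U' for a 0->1 rise
--     # (other pairs produce no token), then count adjacent D,U token pairs.
--     tokens = []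
--     for x, y in zip(arr, arr[1:]):
--         if x == 1 and y == 0:
--             tokens.append('D')
--         elif x == 0 and y == 1:
--             tokens.append('U')
--     return sum(1 for a, b in zip(tokens, tokens[1:]) if a == 'D' and b == 'U')
-- ===== Notes on version B (the rewrite author's own statement) =====
-- stated objective: alternative
-- what changed: Replaces the imperative flag machine with a two-phase pipeline: first tokenize adjacent pairs into an edge sequence (D for 1->0, U for 0->1), then count adjacent D,U token pairs.
import Mathlib
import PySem

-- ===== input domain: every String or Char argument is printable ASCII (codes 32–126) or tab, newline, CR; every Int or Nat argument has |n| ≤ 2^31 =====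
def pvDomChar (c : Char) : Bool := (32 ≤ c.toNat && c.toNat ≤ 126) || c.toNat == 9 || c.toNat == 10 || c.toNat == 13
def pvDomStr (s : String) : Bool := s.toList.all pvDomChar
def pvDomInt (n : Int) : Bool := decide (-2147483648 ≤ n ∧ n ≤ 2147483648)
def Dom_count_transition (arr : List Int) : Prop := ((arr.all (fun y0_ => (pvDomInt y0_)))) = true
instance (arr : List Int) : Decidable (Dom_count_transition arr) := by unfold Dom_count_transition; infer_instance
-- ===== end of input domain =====

-- B changes strategy, not cost: tokenize edges first, then count D,U token pairs (objective: alternative).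

-- ===== PORT A =====
-- A's loop over i in range(len(arr)-1) reading arr[i], arr[i+1] as structural
-- recursion over adjacent elements with the same (count, transition) state.
def pvALoop : List Int → Int → Bool → Int
  | x :: y :: rest, count, transition =>
      if x = 1 ∧ y = 0 then pvALoop (y :: rest) count true
      else if x = 0 ∧ y = 1 ∧ transition = true then pvALoop (y :: rest) (count + 1) false
      else pvALoop (y :: rest) count transition
  | _, count, _ => count

def count_transition (arr : List Int) : Int := pvALoop arr 0 false

-- ===== PORT B =====
-- Source B phase 1: the edge-token list built over zip(arr, arr[1:]).
def pvTokens : List Int → List Char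
  | x :: y :: rest =>
      (if x = 1 ∧ y = 0 then ['D'] else if x = 0 ∧ y = 1 then ['U'] else []) ++ pvTokens (y :: rest)
  | _ => []

-- Source B phase 2: sum of 1 over zip(tokens, tokens[1:]) where the pair is (D, U).
def pvCountDU (ts : List Char) : Int :=
  (((ts.zip ts.tail).filter (fun p => p.1 = 'D' ∧ p.2 = 'U')).map (fun _ => (1 : Int))).sum

def count_transition_alt (arr : List Int) : Int := pvCountDU (pvTokens arr)

-- ===== PRECONDITION & SPEC =====
def Spec_count_transition (arr : List Int) (out : Int) : Prop := out = count_transition_alt arr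
instance (arr : List Int) (out : Int) : Decidable (Spec_count_transition arr out) := by unfold Spec_count_transition; infer_instance

-- ===== CLAIM (what is proved, stated in full; the proofs are below) =====
def Claim_equal_count_transition : Prop := ∀ (arr : List Int), Dom_count_transition arr → Spec_count_transition arr (count_transition arr)

-- ===== LEMMAS AND PROOFS =====

-- Flag-machine consumption of a token stream (proof-only bridge between the two ports).
def pvG : List Char → Bool → Int
  | [], _ => 0
  | c :: rest, t =>
      if c = 'D' then pvG rest true
      else if c = 'U' then (if t then 1 else 0) + pvG rest false
      else pvG rest t

lemma pvTokens_mem : ∀ (arr : List Int), ∀ c ∈ pvTokens arr, c = 'D' ∨ c = 'U' := by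
  intro arr
  induction arr with
  | nil => simp [pvTokens]
  | cons x rest ih =>
    cases rest with
    | nil => simp [pvTokens]
    | cons y rs =>
      intro c hc
      simp only [pvTokens, List.mem_append] at hc
      rcases hc with hc | hc
      · split_ifs at hc <;> simp_all
      · exact ih c hc

lemma pvCountDU_cons (c : Char) (ts : List Char) :
    pvCountDU (c :: ts) =
      (if c = 'D' ∧ ts.head? = some 'U' then 1 else 0) + pvCountDU ts := by
  cases ts with
  | nil => simp [pvCountDU]
  | cons d rs =>
    simp only [pvCountDU, List.tail_cons, List.zip_cons_cons, List.filter_cons, List.head?_cons]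
    split_ifs with h h2 h2 <;> simp_all

lemma pvG_eq_countDU : ∀ (ts : List Char), (∀ c ∈ ts, c = 'D' ∨ c = 'U') →
    ∀ t, pvG ts t = pvCountDU ts + (if t = true ∧ ts.head? = some 'U' then 1 else 0) := by
  intro ts
  induction ts with
  | nil => intro _ t; simp [pvG, pvCountDU]
  | cons c rest ih =>
    intro hmem t
    have hrest : ∀ c ∈ rest, c = 'D' ∨ c = 'U' := fun c hc => hmem c (List.mem_cons_of_mem _ hc)
    rcases hmem c (List.mem_cons_self) with hc | hc <;> subst hc
    · rw [show pvG ('D' :: rest) t = pvG rest true from rfl, ih hrest true, pvCountDU_cons]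
      rw [if_neg (by simp : ¬ (t = true ∧ ('D' :: rest).head? = some 'U'))]
      simp only [true_and]
      by_cases h : rest.head? = some 'U'
      · rw [if_pos h]; omega
      · rw [if_neg h]; omega
    · rw [show pvG ('U' :: rest) t = (if t then 1 else 0) + pvG rest false from by simp [pvG],
          ih hrest false, pvCountDU_cons]
      simp only [List.head?]
      split_ifs <;> simp_all <;> omega

lemma pvALoop_eq : ∀ (arr : List Int) (count : Int) (t : Bool),
    pvALoop arr count t = count + pvG (pvTokens arr) t := by
  intro arr
  induction arr with
  | nil => intro count t; simp [pvALoop, pvTokens, pvG]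
  | cons x rest ih =>
    cases rest with
    | nil => intro count t; simp [pvALoop, pvTokens, pvG]
    | cons y rs =>
      intro count t
      simp only [pvALoop]
      split_ifs with h1 h2
      · rw [ih]
        simp [pvTokens, h1, pvG]
      · rw [ih]
        obtain ⟨hx, hy, ht⟩ := h2
        subst hx; subst hy; subst ht
        simp [pvTokens, pvG]
        omega
      · rw [ih]
        by_cases hu : x = 0 ∧ y = 1
        · have ht : t = false := by
            cases t
            · rfl
            · exact absurd ⟨hu.1, hu.2, rfl⟩ h2
          obtain ⟨hx, hy⟩ := hu
          subst hx; subst hy; subst ht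
          simp [pvTokens, pvG]
        · simp [pvTokens, h1, hu]

-- ===== VERDICT (by name: the statement is the Claim_ definition above) =====
theorem count_transition_spec : Claim_equal_count_transition := by
  intro arr _
  unfold Spec_count_transition count_transition count_transition_alt
  rw [pvALoop_eq, pvG_eq_countDU _ (pvTokens_mem arr) false]
  simp
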